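-- pv_equiv track=rewrite | github.com/prashantssingh/competitive-coding | untracked/amazon_review_search_engine.py | search
-- ===== SOURCE A (Python) =====
-- def search(numRevies, repo, queryStr):
--   searchResult = list()
--   for i, _ in enumerate(queryStr, start = 2):
--     search = queryStr[:i]
--     currRes = list()
--     for each in repo:
--       if search in each:
--         currRes.append(each)
--
--     if len(currRes) > len(searchResult):
--       searchResult = currRes
--
--   return searchResult
-- ===== SOURCE B (Python) =====
-- def search(numRevies, repo, queryStr):
--   if not queryStr:
--     return []
--   needle = queryStr[:2]
--   return [each for each in repo if needle in each]
-- ===== Notes on version B (the rewrite author's own statement) =====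
-- stated objective: faster
-- what changed: Since matches of a longer prefix are a subset of matches of a shorter one, the best result is always the one for queryStr[:2]; B does a single filter pass over repo instead of A's loop over every prefix length.
import Mathlib
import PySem

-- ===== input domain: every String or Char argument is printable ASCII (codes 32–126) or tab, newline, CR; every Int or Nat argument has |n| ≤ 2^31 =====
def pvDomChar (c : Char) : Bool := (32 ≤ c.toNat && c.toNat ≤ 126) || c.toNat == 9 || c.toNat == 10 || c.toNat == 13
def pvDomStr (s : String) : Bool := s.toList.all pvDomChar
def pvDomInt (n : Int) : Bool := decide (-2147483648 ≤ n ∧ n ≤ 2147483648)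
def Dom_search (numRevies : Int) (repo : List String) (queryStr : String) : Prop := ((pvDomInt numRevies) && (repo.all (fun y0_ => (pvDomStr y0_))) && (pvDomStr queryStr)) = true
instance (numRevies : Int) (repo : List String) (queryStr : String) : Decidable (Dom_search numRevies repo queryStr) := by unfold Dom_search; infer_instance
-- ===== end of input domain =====

-- B: since the repo entries matching a longer prefix of queryStr are a subset of those matching a
-- shorter one, the best result is always the one for queryStr[:2]; B is a single filter pass (faster).

-- ===== PORT A =====
-- body of A's outer 'for i, _ in enumerate(queryStr, start=2)' loop, transliterated
def searchStep (repo : List String) (queryStr : String) (searchResult : List String) (p : Int × Char) : List String :=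
  let se := PySem.Str.slice queryStr none (some p.1)          -- search = queryStr[:i]
  let currRes := repo.foldl
    (fun acc each => if PySem.Str.isIn se each then acc ++ [each] else acc) []
  if currRes.length > searchResult.length then currRes else searchResult

def search (numRevies : Int) (repo : List String) (queryStr : String) : List String :=
  (PySem.List.enumerate queryStr.toList 2).foldl (searchStep repo queryStr) []

-- ===== PORT B =====
def search_alt (numRevies : Int) (repo : List String) (queryStr : String) : List String :=
  if queryStr.toList.isEmpty then []
  else
    let needle := PySem.Str.slice queryStr none (some 2)          -- queryStr[:2]
    repo.filter (fun each => PySem.Str.isIn needle each)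

-- ===== PRECONDITION & SPEC =====
def Spec_search (numRevies : Int) (repo : List String) (queryStr : String) (out : List String) : Prop := out = search_alt numRevies repo queryStr
instance (numRevies : Int) (repo : List String) (queryStr : String) (out : List String) : Decidable (Spec_search numRevies repo queryStr out) := by unfold Spec_search; infer_instance

-- ===== CLAIM (what is proved, stated in full; the proofs are below) =====
def Claim_equal_search : Prop := ∀ (numRevies : Int) (repo : List String) (queryStr : String), Dom_search numRevies repo queryStr → Spec_search numRevies repo queryStr (search numRevies repo queryStr)

-- ===== LEMMAS AND PROOFS =====

-- A's inner loop over repo is a filter.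
theorem pv_inner_filter (repo : List String) (se : String) (acc : List String) :
    repo.foldl (fun acc each => if PySem.Str.isIn se each then acc ++ [each] else acc) acc
      = acc ++ repo.filter (fun each => PySem.Str.isIn se each) := by
  induction repo generalizing acc with
  | nil => simp
  | cons h t ih =>
    rw [List.foldl_cons, List.filter_cons]
    by_cases hin : PySem.Str.isIn se h = true
    · rw [if_pos hin, if_pos hin, ih]; simp
    · rw [if_neg hin, if_neg hin, ih]

-- A repo entry containing queryStr[:k] (k ≥ 2) also contains queryStr[:2].
theorem pv_isIn_mono (q e : String) (k : Nat) (hk : 2 ≤ k)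
    (h : PySem.Str.isIn (PySem.Str.slice q none (some (k : Int))) e = true) :
    PySem.Str.isIn (PySem.Str.slice q none (some 2)) e = true := by
  rw [PySem.Str.isIn_iff_infix] at h ⊢
  rw [PySem.Str.toList_slice] at h ⊢
  simp only [PySem.Chars.slice_eq_listSlice] at h ⊢
  rw [PySem.List.slice_to_natCast] at h
  have h2 : PySem.List.slice q.toList none (some 2) = q.toList.take 2 := by
    simpa using PySem.List.slice_to_natCast q.toList 2
  rw [h2]
  refine List.IsInfix.trans ?_ h
  have ht : q.toList.take 2 = (q.toList.take k).take 2 := by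
    rw [List.take_take, min_eq_left hk]
  rw [ht]
  exact (List.take_prefix 2 _).isInfix

-- The best list: the matches of queryStr[:2].
def pvBest (repo : List String) (queryStr : String) : List String :=
  repo.filter (fun each => PySem.Str.isIn (PySem.Str.slice queryStr none (some 2)) each)

-- A later iteration (index k ≥ 2) produces a list no longer than pvBest, so the state is unchanged.
theorem pv_step_const (repo : List String) (q : String) (p : Int × Char) (k : Nat)
    (hpk : p.1 = (k : Int)) (hk : 2 ≤ k) :
    searchStep repo q (pvBest repo q) p = pvBest repo q := by
  simp only [searchStep]
  rw [pv_inner_filter, List.nil_append, hpk]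
  have hle : (repo.filter (fun each => PySem.Str.isIn (PySem.Str.slice q none (some (k : Int))) each)).length
      ≤ (pvBest repo q).length := by
    unfold pvBest
    rw [← List.countP_eq_length_filter, ← List.countP_eq_length_filter]
    exact List.countP_mono_left (fun x _ hx => pv_isIn_mono q x k hk hx)
  rw [if_neg (by omega)]

theorem pv_tail_const (repo : List String) (q : String) (l : List (Int × Char))
    (hl : ∀ p ∈ l, ∃ k : Nat, p.1 = (k : Int) ∧ 2 ≤ k) :
    l.foldl (searchStep repo q) (pvBest repo q) = pvBest repo q := by
  induction l with
  | nil => rfl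
  | cons p t ih =>
    obtain ⟨k, hpk, hk⟩ := hl p (by simp)
    rw [List.foldl_cons, pv_step_const repo q p k hpk hk]
    exact ih (fun p hp => hl p (List.mem_cons_of_mem _ hp))

-- The first iteration (i = 2) turns the empty state into pvBest.
theorem pv_first_step (repo : List String) (q : String) (c : Char) :
    searchStep repo q [] (2, c) = pvBest repo q := by
  simp only [searchStep]
  rw [pv_inner_filter, List.nil_append]
  unfold pvBest
  cases repo.filter (fun each => PySem.Str.isIn (PySem.Str.slice q none (some 2)) each) with
  | nil => rfl
  | cons a t => rw [if_pos (by simp)]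

-- ===== VERDICT (by name: the statement is the Claim_ definition above) =====
theorem search_spec : Claim_equal_search := by
  intro numRevies repo queryStr _
  unfold Spec_search search search_alt
  cases hq : queryStr.toList with
  | nil => simp [PySem.List.enumerate_nil]
  | cons c rest =>
    rw [PySem.List.enumerate_cons, List.foldl_cons, pv_first_step]
    rw [pv_tail_const repo queryStr _ (by
      intro p hp
      rw [PySem.List.mem_enumerate_iff] at hp
      obtain ⟨k, hkl, rfl⟩ := hp
      exact ⟨3 + k, by push_cast; ring, by omega⟩)]
    simp [pvBest]
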